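-- pv_equiv track=rewrite | github.com/HU3YN/VoyageAI-Explorer | agents/destination_agent.py | _get_match_score
-- ===== SOURCE A (Python) =====
-- def _get_match_score(interest, keywords_list, description):
--     """Get match score based on match type"""
--     # Exact match = 100
--     if interest in keywords_list:
--         return ("exact", 100)
--
--     # Singular/plural = 95
--     for kw in keywords_list:
--         if (interest == kw + 's' or interest + 's' == kw or
--             interest == kw + 'es' or interest + 'es' == kw or
--             interest + 'ing' == kw or kw + 'ing' == interest):
--             return ("variant", 95)
--
--     # Substring match = 70
--     for kw in keywords_list:
--         if len(interest) > 3 and len(kw) > 3: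
--             if interest in kw or kw in interest:
--                 return ("partial", 70)
--
--     # Description = 40
--     if interest in description.lower():
--         return ("description", 40)
--
--     return ("none", 0)
-- ===== SOURCE B (Python) =====
-- def _get_match_score(interest, keywords_list, description):
--     """Get match score based on match type"""
--     if interest in keywords_list:
--         return ("exact", 100)
--
--     # One pass over the keywords, keeping the best tier seen (95 > 70 > 0);
--     # 95 is the top tier, so stop as soon as a variant is found.
--     best = 0
--     for kw in keywords_list:
--         if (interest == kw + 's' or interest + 's' == kw or
--             interest == kw + 'es' or interest + 'es' == kw or
--             interest + 'ing' == kw or kw + 'ing' == interest):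
--             best = 95
--             break
--         if len(interest) > 3 and len(kw) > 3 and (interest in kw or kw in interest):
--             best = max(best, 70)
--
--     if best == 95:
--         return ("variant", 95)
--     if best == 70:
--         return ("partial", 70)
--     if interest in description.lower():
--         return ("description", 40)
--     return ("none", 0)
-- ===== Notes on version B (the rewrite author's own statement) =====
-- stated objective: alternative
-- what changed: Replaces A's two sequential whole-list scans (variant pass, then substring pass) with a single pass that folds the best tier score over the keywords, deciding the label from the folded maximum afterwards.
import Mathlib
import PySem

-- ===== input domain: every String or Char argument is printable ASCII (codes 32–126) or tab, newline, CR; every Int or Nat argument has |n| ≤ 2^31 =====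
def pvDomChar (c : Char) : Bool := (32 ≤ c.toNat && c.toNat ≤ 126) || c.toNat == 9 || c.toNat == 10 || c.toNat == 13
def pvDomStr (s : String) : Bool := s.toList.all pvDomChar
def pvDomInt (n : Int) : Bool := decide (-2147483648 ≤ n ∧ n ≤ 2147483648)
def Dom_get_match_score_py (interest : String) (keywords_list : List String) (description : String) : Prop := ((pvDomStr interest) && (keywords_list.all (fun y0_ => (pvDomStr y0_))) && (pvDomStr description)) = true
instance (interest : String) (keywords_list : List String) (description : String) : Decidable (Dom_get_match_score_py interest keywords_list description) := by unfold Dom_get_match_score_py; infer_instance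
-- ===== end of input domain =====

-- B folds the best tier score over the keywords in ONE pass instead of A's two sequential scans; alternative decomposition, same cost.


-- ===== PORT A =====
-- the big or-chain of the variant test (same expression in both Python sources)
def pvVariant (interest kw : String) : Bool :=
  interest == kw ++ "s" || interest ++ "s" == kw ||
  interest == kw ++ "es" || interest ++ "es" == kw ||
  interest ++ "ing" == kw || kw ++ "ing" == interest

-- 'len(interest) > 3 and len(kw) > 3' and 'interest in kw or kw in interest'
def pvSubst (interest kw : String) : Bool :=
  (decide (PySem.Str.len interest > 3) && decide (PySem.Str.len kw > 3)) &&
  (PySem.Str.isIn interest kw || PySem.Str.isIn kw interest)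

-- A's second for-loop, falling through to the description check
def aLoop2 (interest description : String) : List String → String × Int
  | [] =>
      if PySem.Str.isIn interest (PySem.Str.lower description) then ("description", 40)
      else ("none", 0)
  | kw :: rest =>
      if pvSubst interest kw then ("partial", 70) else aLoop2 interest description rest

-- A's first for-loop, falling through to the second loop over the full list
def aLoop1 (interest description : String) (kws : List String) : List String → String × Int
  | [] => aLoop2 interest description kws
  | kw :: rest =>
      if pvVariant interest kw then ("variant", 95) else aLoop1 interest description kws rest

def get_match_score_py (interest : String) (keywords_list : List String) (description : String) : String × Int :=
  if keywords_list.contains interest then ("exact", 100)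
  else aLoop1 interest description keywords_list keywords_list

-- ===== PORT B =====
-- B's single loop: best tier seen so far; a variant (tier 95) is maximal, so it breaks
def bLoop (interest : String) : Int → List String → Int
  | b, [] => b
  | b, kw :: rest =>
      if pvVariant interest kw then 95
      else if pvSubst interest kw then bLoop interest (max b 70) rest
      else bLoop interest b rest

def get_match_score_py_alt (interest : String) (keywords_list : List String) (description : String) : String × Int :=
  if keywords_list.contains interest then ("exact", 100)
  else
    let best := bLoop interest 0 keywords_list
    if best == 95 then ("variant", 95)
    else if best == 70 then ("partial", 70)
    else if PySem.Str.isIn interest (PySem.Str.lower description) then ("description", 40)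
    else ("none", 0)

-- ===== PRECONDITION & SPEC =====
def Spec_get_match_score_py (interest : String) (keywords_list : List String) (description : String) (out : String × Int) : Prop := out = get_match_score_py_alt interest keywords_list description
instance (interest : String) (keywords_list : List String) (description : String) (out : String × Int) : Decidable (Spec_get_match_score_py interest keywords_list description out) := by unfold Spec_get_match_score_py; infer_instance

-- ===== CLAIM (what is proved, stated in full; the proofs are below) =====
def Claim_equal_get_match_score_py : Prop := ∀ (interest : String) (keywords_list : List String) (description : String), Dom_get_match_score_py interest keywords_list description → Spec_get_match_score_py interest keywords_list description (get_match_score_py interest keywords_list description)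

-- ===== LEMMAS AND PROOFS =====

-- one step of B's loop, on the tier of the rest of the list, Bools generalized
lemma tier_cons (v s av as : Bool) (b : Int) (hb : b ≤ 70) :
    (if v then (95 : Int)
     else if s then max (max b 70) (if av then (95 : Int) else if as then 70 else 0)
     else max b (if av then (95 : Int) else if as then 70 else 0)) =
      max b (if (v || av) then (95 : Int) else if (s || as) then 70 else 0) := by
  cases v <;> cases s <;> cases av <;> cases as <;> simp <;> omega

-- B's loop computes the tier of the best keyword in the list
lemma fold_best (interest : String) (l : List String) (b : Int) (hb0 : 0 ≤ b) (hb : b ≤ 70) :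
    bLoop interest b l =
      max b (if l.any (pvVariant interest) then 95
             else if l.any (pvSubst interest) then 70 else 0) := by
  induction l generalizing b with
  | nil => simp [bLoop]; omega
  | cons kw rest ih =>
      simp only [bLoop, List.any_cons]
      rw [ih (max b 70) (by omega) (by omega), ih b hb0 hb]
      exact tier_cons _ _ _ _ b hb

lemma aLoop1_char (interest description : String) (kws l : List String) :
    aLoop1 interest description kws l =
      if l.any (pvVariant interest) then ("variant", 95)
      else aLoop2 interest description kws := by
  induction l with
  | nil => simp [aLoop1]
  | cons kw rest ih =>
      simp only [aLoop1, List.any_cons]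
      by_cases h : pvVariant interest kw = true
      · simp [h]
      · rw [if_neg h, ih]; simp at h; simp [h]

lemma aLoop2_char (interest description : String) (l : List String) :
    aLoop2 interest description l =
      if l.any (pvSubst interest) then ("partial", 70)
      else if PySem.Str.isIn interest (PySem.Str.lower description) then ("description", 40)
      else ("none", 0) := by
  induction l with
  | nil => simp [aLoop2]
  | cons kw rest ih =>
      simp only [aLoop2, List.any_cons]
      by_cases h : pvSubst interest kw = true
      · simp [h]
      · rw [if_neg h, ih]; simp at h; simp [h]

-- ===== VERDICT (by name: the statement is the Claim_ definition above) =====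
theorem get_match_score_py_spec : Claim_equal_get_match_score_py := by
  intro interest keywords_list description _
  unfold Spec_get_match_score_py get_match_score_py get_match_score_py_alt
  rw [aLoop1_char, aLoop2_char, fold_best interest keywords_list 0 le_rfl (by norm_num)]
  split_ifs <;> simp_all
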